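-- pv_equiv track=rewrite | github.com/shinwonse/coding-test | 프로그래머스/unrated/135808. 과일 장수/과일 장수.py | solution
-- ===== SOURCE A (Python) =====
-- def solution(k, m, score):
--     result = 0
--     score.sort(reverse=True)
--
--     for i in range(0, len(score), m):
--         box = score[i:i + m]
--
--         if len(box) == m:
--             result += min(box) * m
--
--     # while len(score) >= m:
--     #     box = []
--     #     for i in range(m):
--     #         box.append(score.pop(0))
--     #     result += min(box) * m
--
--     return result
-- ===== SOURCE B (Python) =====
-- def solution(k, m, score):
--     counts = {}
--     for x in score:
--         counts[x] = counts.get(x, 0) + 1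
--     full = len(score) // m
--     total = 0
--     pos = 0
--     t = 1
--     for v in sorted(counts, reverse=True):
--         pos += counts[v]
--         while t <= full and t * m <= pos:
--             total += v * m
--             t += 1
--     return total
-- ===== Notes on version B (the rewrite author's own statement) =====
-- stated objective: alternative
-- what changed: B builds a value->count hash table in one pass, sorts only the distinct values descending, and walks the runs with a block-boundary pointer (every boundary t*m falling inside a run contributes that run's value times m), so there is no per-block slicing and no min() scan and only distinct values are sorted; Pre_ excludes only m = 0, where A raises ValueError (range() arg 3 must not be zero).
import Mathlib
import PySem

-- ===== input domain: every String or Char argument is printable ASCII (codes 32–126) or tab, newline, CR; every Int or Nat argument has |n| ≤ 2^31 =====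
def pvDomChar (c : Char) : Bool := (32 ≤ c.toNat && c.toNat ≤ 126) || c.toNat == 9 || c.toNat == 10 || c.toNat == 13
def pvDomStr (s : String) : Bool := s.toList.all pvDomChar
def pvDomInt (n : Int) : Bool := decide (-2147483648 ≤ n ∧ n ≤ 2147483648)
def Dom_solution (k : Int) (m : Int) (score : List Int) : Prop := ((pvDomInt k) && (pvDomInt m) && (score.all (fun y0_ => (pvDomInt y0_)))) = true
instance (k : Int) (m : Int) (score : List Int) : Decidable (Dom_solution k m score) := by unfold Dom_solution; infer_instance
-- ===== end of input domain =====

-- B counts the scores into a hash map, sorts only the distinct values descending, and walks the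
-- runs with a block-boundary pointer instead of A's slice-each-block-and-min scan (objective:
-- alternative). A sorts `score` in place; the equivalence proved here is about the return value
-- only (B does not mutate its argument).

-- ===== PORT A =====
def solution (k : Int) (m : Int) (score : List Int) : Int :=
  (PySem.List.pyRange 0 ((PySem.List.sorted score (fun x => x) true).length : Int) m).foldl
    (fun result i =>
      if ((PySem.List.slice (PySem.List.sorted score (fun x => x) true) (some i) (some (i + m))).length : Int) = m then
        result + (PySem.List.min? (PySem.List.slice (PySem.List.sorted score (fun x => x) true) (some i) (some (i + m))) (fun y => y)).getD 0 * m
      else result) 0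

-- ===== PORT B =====
-- the inner `while t <= full and t * m <= pos: total += v * m; t += 1` of Source B
def bWhile (v : Int) (m : Int) (full : Int) (pos : Int) (total : Int) (t : Int) : Int × Int :=
  if h : t ≤ full ∧ t * m ≤ pos then bWhile v m full pos (total + v * m) (t + 1)
  else (total, t)
termination_by (full + 1 - t).toNat
decreasing_by omega

def solution_alt (k : Int) (m : Int) (score : List Int) : Int :=
  ((PySem.List.sorted ((score.foldl (fun d x => d.insert x (d.getD x 0 + 1)) PySem.Dict.empty : PySem.Dict Int Int)).keys (fun x => x) true).foldl
    (fun st v =>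
      let pos := st.2.1 + (score.foldl (fun d x => d.insert x (d.getD x 0 + 1)) PySem.Dict.empty).getD v 0
      let tt := bWhile v m (PySem.Int.floordiv (score.length : Int) m) pos st.1 st.2.2
      (tt.1, pos, tt.2)) ((0 : Int), (0 : Int), (1 : Int))).1

-- ===== PRECONDITION & SPEC =====
-- Pre_ excludes exactly m = 0, where Python A raises ValueError (range() arg 3 must not be zero).
def Pre_solution (k : Int) (m : Int) (score : List Int) : Prop := m ≠ 0
instance (k : Int) (m : Int) (score : List Int) : Decidable (Pre_solution k m score) := by unfold Pre_solution; infer_instance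
def pvWitness_solution : Int × Int × List Int := (4, 3, [1, 2, 3, 1, 2, 3, 1])
def Spec_solution (k : Int) (m : Int) (score : List Int) (out : Int) : Prop := out = solution_alt k m score
instance (k : Int) (m : Int) (score : List Int) (out : Int) : Decidable (Spec_solution k m score out) := by unfold Spec_solution; infer_instance

-- ===== CLAIM (what is proved, stated in full; the proofs are below) =====
def Claim_equal_solution : Prop := ∀ (k : Int) (m : Int) (score : List Int), Dom_solution k m score → Pre_solution k m score → Spec_solution k m score (solution k m score)

-- ===== LEMMAS AND PROOFS =====

-- proof-only reference value: m * sum over the n//m full blocks of the block minimum,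
-- read off the ascending sort at index n-(t+1)*m
def bRef (m : Int) (score : List Int) : Int :=
  m * (PySem.List.pyRange 0 (PySem.Int.floordiv ((PySem.List.sorted score (fun x => x)).length : Int) m) 1).foldl
        (fun acc t => acc + (PySem.List.pyGet? (PySem.List.sorted score (fun x => x))
          (((PySem.List.sorted score (fun x => x)).length : Int) - (t + 1) * m)).getD 0) 0

-- range(a, b, s) with negative step is empty when a ≤ b
lemma pyRange_neg_step_nil (a b s : Int) (hs : s < 0) (hab : a ≤ b) :
    PySem.List.pyRange a b s = [] := by
  simp only [PySem.List.pyRange]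
  rw [if_neg (by omega)]
  rw [if_neg (by omega), if_neg (by omega)]
  simp

-- sorting in reverse is the reverse of sorting ascending (identity key, Int values)
lemma sorted_rev_eq_reverse (xs : List Int) :
    PySem.List.sorted xs (fun x => x) true = (PySem.List.sorted xs (fun x => x)).reverse := by
  apply List.Perm.eq_of_pairwise (le := fun a b : Int => b ≤ a)
  · intro a b _ _ h1 h2; omega
  · exact PySem.List.sorted_pairwise_rev xs (fun x => x)
  · rw [List.pairwise_reverse]
    exact PySem.List.sorted_pairwise xs (fun x => x)
  · exact ((PySem.List.sorted_perm xs (fun x => x) true).trans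
      (PySem.List.sorted_perm xs (fun x => x) false).symm).trans (List.reverse_perm _).symm

-- min of a nonempty descending list is its last element
lemma foldl_min_desc (t : List Int) : ∀ (x : Int), (∀ y ∈ t, y ≤ x) →
    t.Pairwise (fun a b => b ≤ a) → t.foldl min x = (x :: t).getLast (by simp) := by
  induction t with
  | nil => intro x _ _; simp
  | cons y t ih =>
    intro x hx hp
    have hyx : y ≤ x := hx y (by simp)
    have hp' := (List.pairwise_cons.mp hp)
    simp only [List.foldl_cons]
    rw [min_eq_right hyx]
    rw [ih y hp'.1 hp'.2]
    simp [List.getLast]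

lemma min_desc_getLast (l : List Int) (h : l ≠ [])
    (hp : l.Pairwise (fun a b : Int => b ≤ a)) :
    PySem.List.min? l (fun y => y) = some (l.getLast h) := by
  cases l with
  | nil => exact absurd rfl h
  | cons x t =>
    rw [PySem.List.min?_id_cons]
    have hp' := List.pairwise_cons.mp hp
    rw [foldl_min_desc t x hp'.1 hp'.2]

-- a conditional accumulate loop is z + a sum of conditional terms
lemma foldl_if_add (l : List Int) (P : Int → Prop) [DecidablePred P] (f : Int → Int) (z : Int) :
    l.foldl (fun r i => if P i then r + f i else r) z
      = z + (l.map (fun i => if P i then f i else 0)).sum := by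
  have h : (fun (r i : Int) => if P i then r + f i else r)
      = fun r i => r + (if P i then f i else 0) := by
    funext r i; split_ifs <;> simp
  rw [h, PySem.List.foldl_add]

-- A = bRef for positive m
lemma case_pos (k m : Int) (score : List Int) (hm : 0 < m) :
    solution k m score = bRef m score := by
  obtain ⟨M, rfl⟩ : ∃ M : ℕ, m = (M : Int) := ⟨m.toNat, (Int.toNat_of_nonneg hm.le).symm⟩
  have hM : 0 < M := by exact_mod_cast hm
  unfold solution bRef
  rw [sorted_rev_eq_reverse]
  set a := PySem.List.sorted score (fun x => x) with ha
  set n := a.length with hn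
  rw [List.length_reverse]
  rw [PySem.Int.floordiv_natCast n M]
  rw [PySem.List.pyRange_of_pos 0 (n : Int) (by exact_mod_cast hM)]
  rw [PySem.List.pyRange_one]
  rw [foldl_if_add, PySem.List.foldl_add]
  simp only [List.map_map, zero_add]
  have hq0 : ((↑(n / M) - 0 : Int)).toNat = n / M := by
    rw [Int.sub_zero, Int.toNat_natCast]
  rw [hq0]
  have hC : (if (0:Int) < ↑n then (((n:Int) - 0 + ↑M - 1) / ↑M).toNat else 0) = (n + M - 1) / M := by
    split_ifs with h
    · have e : ((n:Int) - 0 + ↑M - 1) = ((n + M - 1 : ℕ) : Int) := by omega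
      rw [e, ← Int.natCast_div, Int.toNat_natCast]
    · have hn0 : n = 0 := by omega
      rw [hn0]
      rw [Nat.div_eq_of_lt (by omega)]
  rw [hC]
  set q := n / M with hqdef
  set C := (n + M - 1) / M with hCdef
  have hqC : q ≤ C := Nat.div_le_div_right (by omega)
  have hnq : n < (q + 1) * M := by
    exact (Nat.div_lt_iff_lt_mul hM).mp (by omega)
  have e2 : ∀ kk : ℕ, PySem.List.slice a.reverse (some ((M:Int) * kk)) (some ((M:Int) * kk + ↑M))
      = (a.reverse.drop (M * kk)).take M := by
    intro kk
    have e1 : ((M:Int) * (kk:Int)) = ((M * kk : ℕ) : Int) := by push_cast; ring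
    rw [e1, PySem.List.slice_natCast_add]
  have hlen : ∀ kk : ℕ, ((a.reverse.drop (M * kk)).take M).length = min M (n - M * kk) := by
    intro kk; simp [List.length_take, List.length_drop, ← hn]
  rw [show C = q + (C - q) from (Nat.add_sub_cancel' hqC).symm, List.range_add,
    List.map_append, List.sum_append, List.map_map]
  have htail : (List.map (((fun i =>
        if ↑(PySem.List.slice a.reverse (some i) (some (i + ↑M))).length = (↑M:Int) then
          (PySem.List.min? (PySem.List.slice a.reverse (some i) (some (i + ↑M))) fun y => y).getD 0 * ↑M
        else 0) ∘ (fun k : ℕ => (↑M:Int) * ↑k)) ∘ fun x => q + x) (List.range (C - q))).sum = 0 := by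
    apply List.sum_eq_zero
    intro x hx
    obtain ⟨j, hj, rfl⟩ := List.mem_map.mp hx
    simp only [Function.comp_apply]
    rw [e2 (q + j)]
    rw [hlen (q + j)]
    rw [if_neg]
    have hlt : n < M * (q + j) + M := by nlinarith [hnq, Nat.zero_le (M * j)]
    intro hEq
    have hmin : min M (n - M * (q + j)) = M := by exact_mod_cast hEq
    generalize hg : M * (q + j) = t at hlt hmin
    omega
  rw [htail, add_zero]
  have hcong : List.map ((fun i =>
        if ↑(PySem.List.slice a.reverse (some i) (some (i + ↑M))).length = (↑M:Int) then
          (PySem.List.min? (PySem.List.slice a.reverse (some i) (some (i + ↑M))) fun y => y).getD 0 * ↑M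
        else 0) ∘ (fun k : ℕ => (↑M:Int) * ↑k)) (List.range q)
      = List.map (fun kk : ℕ => (↑M:Int) * (PySem.List.pyGet? a ((↑n:Int) - (↑kk + 1) * ↑M)).getD 0) (List.range q) := by
    apply List.map_congr_left
    intro kk hk
    have hkq : kk < q := List.mem_range.mp hk
    have hkM : (kk + 1) * M ≤ n := (Nat.le_div_iff_mul_le hM).mp (by omega)
    have hr : (kk + 1) * M = M * kk + M := by ring
    simp only [Function.comp_apply]
    rw [e2 kk]
    have hl : (List.take M (List.drop (M * kk) a.reverse)).length = M := by
      rw [hlen kk]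
      generalize hg : M * kk = t at hr ⊢
      omega
    rw [if_pos (by exact_mod_cast congrArg (Nat.cast (R := Int)) hl)]
    have hne : List.take M (List.drop (M * kk) a.reverse) ≠ [] := by
      intro h0; rw [h0] at hl; simp at hl; omega
    have hpair : (List.take M (List.drop (M * kk) a.reverse)).Pairwise (fun x y : Int => y ≤ x) := by
      apply List.Pairwise.sublist ((List.take_sublist _ _).trans (List.drop_sublist _ _))
      rw [List.pairwise_reverse]
      exact PySem.List.sorted_pairwise score (fun x => x)
    rw [min_desc_getLast _ hne hpair, Option.getD_some]
    rw [List.getLast_eq_getElem]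
    simp only [hl]
    rw [List.getElem_take, List.getElem_drop, List.getElem_reverse]
    have hidx : ((n:Int) - ((kk:Int) + 1) * (M:Int)) = ((n - (kk + 1) * M : ℕ) : Int) := by
      rw [Nat.cast_sub hkM]; push_cast; ring
    rw [hidx, PySem.List.pyGet?_natCast]
    have hj2 : n - (kk + 1) * M < n := by
      generalize hg : M * kk = t at hr
      omega
    rw [List.getElem?_eq_getElem (by rw [← hn]; exact hj2), Option.getD_some]
    rw [mul_comm]
    have hidx2 : a.length - 1 - (M * kk + (M - 1)) = n - (kk + 1) * M := by
      rw [hr] at hkM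
      rw [← hn, hr]
      omega
    simp only [hidx2]
  rw [hcong, PySem.List.sum_map_const_mul_int]
  rfl

lemma A_eq_bRef (k m : Int) (score : List Int) (hm : m ≠ 0) :
    solution k m score = bRef m score := by
  rcases lt_or_gt_of_ne hm with hneg | hpos
  · unfold solution bRef
    rw [pyRange_neg_step_nil _ _ _ hneg (Int.natCast_nonneg _)]
    have hq : PySem.Int.floordiv ((PySem.List.sorted score (fun x => x)).length : Int) m ≤ 0 := by
      have h1 := PySem.Int.floordiv_mul_add_mod ((PySem.List.sorted score (fun x => x)).length : Int) m
      have h2 := PySem.Int.mod_neg_bounds (a := ((PySem.List.sorted score (fun x => x)).length : Int)) hneg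
      have h3 : (0:Int) ≤ ((PySem.List.sorted score (fun x => x)).length : Int) := Int.natCast_nonneg _
      nlinarith [h1, h2.1, h2.2, h3]
    rw [PySem.List.pyRange_one_eq_nil hq]
    simp
  · exact case_pos k m score hpos

-- ---------- B-side ----------

-- closed form for the inner while loop, nat-cast arguments, positive m
lemma bWhile_spec (v : Int) (M full P : ℕ) (hM : 0 < M) :
    ∀ (T : ℕ) (total : Int),
    bWhile v (M : Int) (full : Int) (P : Int) total (T : Int)
      = (total + v * M * ((max T (min full (P / M) + 1) - T : ℕ) : Int),
         ((max T (min full (P / M) + 1) : ℕ) : Int)) := by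
  intro T
  induction hfuel : full + 1 - T using Nat.strong_induction_on generalizing T with
  | _ fuel ih =>
    intro total
    rw [bWhile]
    set X := min full (P / M) + 1 with hX
    by_cases hg : (T : Int) ≤ (full : Int) ∧ (T : Int) * (M : Int) ≤ (P : Int)
    · rw [dif_pos hg]
      have hTfull : T ≤ full := by exact_mod_cast hg.1
      have hTM : T * M ≤ P := by exact_mod_cast hg.2
      have hTdiv : T ≤ P / M := (Nat.le_div_iff_mul_le hM).mpr hTM
      have hTX : T < X := by omega
      have hrec := ih (full + 1 - (T + 1)) (by omega) (T + 1) rfl (total + v * M)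
      have hcast : ((T : Int) + 1) = ((T + 1 : ℕ) : Int) := by push_cast; ring
      rw [hcast, hrec]
      have hX1 : max (T + 1) X = X := by omega
      have hX2 : max T X = X := by omega
      rw [hX1, hX2]
      have h1 : ((X - (T + 1) : ℕ) : Int) = (X : Int) - T - 1 := by
        have : T + 1 ≤ X := hTX
        omega
      have h2 : ((X - T : ℕ) : Int) = (X : Int) - T := by omega
      rw [h1, h2, Prod.mk.injEq]
      exact ⟨by ring, rfl⟩
    · rw [dif_neg hg]
      have hXT : X ≤ T := by
        by_contra hc
        push_neg at hc
        have hTfull : T ≤ full := by omega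
        have hTdiv : T ≤ P / M := by omega
        exact hg ⟨by exact_mod_cast hTfull,
          by exact_mod_cast (Nat.le_div_iff_mul_le hM).mp hTdiv⟩
      have h1 : max T X = T := by omega
      rw [h1]
      simp

-- elements of a run: inside replicate the value is constant
lemma drop_elem_of_run (d : List Int) (p c : ℕ) (v : Int) (rest : List Int)
    (hdrop : d.drop p = List.replicate c v ++ rest) (i : ℕ) (hpi : p ≤ i) (hic : i < p + c) :
    d[i]? = some v := by
  have h1 : d[i]? = (d.drop p)[i - p]? := by
    rw [List.getElem?_drop]
    congr 1
    omega
  rw [h1, hdrop]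
  rw [List.getElem?_append_left (by simp; omega)]
  rw [List.getElem?_replicate]
  rw [if_pos (by omega)]

-- List.range sums are Finset.range sums
lemma list_range_sum (f : ℕ → Int) (n : ℕ) :
    ((List.range n).map f).sum = ∑ i ∈ Finset.range n, f i := by
  induction n with
  | zero => simp
  | succ n ih =>
    rw [List.range_succ, List.map_append, List.sum_append, Finset.sum_range_succ, ih]
    simp

-- the run walk of B computes the boundary sum
lemma walk (score : List Int) (M : ℕ) (hM : 0 < M) (d : List Int) :
    ∀ (r : List Int) (p : ℕ) (total : Int),
    d.drop p = r.flatMap (fun v => List.replicate (score.count v) v) →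
    p + (r.flatMap (fun v => List.replicate (score.count v) v)).length = d.length →
    (r.foldl (fun st v =>
        ((bWhile v (M : Int) ((d.length / M : ℕ) : Int) (st.2.1 + (PySem.Dict.counter score).getD v 0) st.1 st.2.2).1,
         st.2.1 + (PySem.Dict.counter score).getD v 0,
         (bWhile v (M : Int) ((d.length / M : ℕ) : Int) (st.2.1 + (PySem.Dict.counter score).getD v 0) st.1 st.2.2).2))
      (total, (p : Int), ((min (d.length / M) (p / M) + 1 : ℕ) : Int))).1
      = total + (M : Int) * ∑ τ ∈ Finset.Ico (min (d.length / M) (p / M) + 1) (d.length / M + 1),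
          (d[τ * M - 1]?.getD 0) := by
  intro r
  induction r with
  | nil =>
    intro p total hdrop hlen
    simp only [List.flatMap_nil, List.length_nil, Nat.add_zero] at hdrop hlen
    subst hlen
    simp
  | cons v rest ih =>
    intro p total hdrop hlen
    set full := d.length / M with hfull
    simp only [List.flatMap_cons] at hdrop hlen
    have h1 : d.drop (p + score.count v) = (d.drop p).drop (score.count v) := by
      rw [List.drop_drop, Nat.add_comm]
    have h2 : (d.drop p).drop (score.count v)
        = rest.flatMap (fun v => List.replicate (score.count v) v) := by
      have h3 := congrArg (List.drop (List.replicate (score.count v) v).length) hdrop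
      rw [List.drop_left] at h3
      simpa using h3
    have hdropc : d.drop (p + score.count v)
        = rest.flatMap (fun v => List.replicate (score.count v) v) := h1.trans h2
    have hlenc : p + score.count v
        + (rest.flatMap (fun v => List.replicate (score.count v) v)).length = d.length := by
      simp only [List.length_append, List.length_replicate] at hlen
      omega
    simp only [List.foldl_cons]
    rw [PySem.Dict.getD_counter]
    have hposcast : (p : Int) + ((score.count v : ℕ) : Int) = ((p + score.count v : ℕ) : Int) := by
      push_cast; ring
    simp only [hposcast]
    rw [bWhile_spec v M full (p + score.count v) hM]
    set X := min full (p / M) + 1 with hX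
    set X' := min full ((p + score.count v) / M) + 1 with hX'
    have hmono : X ≤ X' := by
      have := Nat.div_le_div_right (c := M) (Nat.le_add_right p (score.count v))
      omega
    have hmax : max X X' = X' := by omega
    rw [hmax]
    have hres := ih (p + score.count v) (total + v * M * ((X' - X : ℕ) : Int)) hdropc hlenc
    simp only [← hX'] at hres
    rw [hres]
    have hval : ∀ τ ∈ Finset.Ico X X', (d[τ * M - 1]?.getD 0 : Int) = v := by
      intro τ hτ
      obtain ⟨hτ1, hτ2⟩ := Finset.mem_Ico.mp hτ
      have hτfull : τ ≤ full := by omega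
      have hτdiv : p / M < τ := by omega
      have hτdiv' : τ ≤ (p + score.count v) / M := by omega
      have hlow : p < τ * M := (Nat.div_lt_iff_lt_mul hM).mp hτdiv
      have hhigh : τ * M ≤ p + score.count v := (Nat.le_div_iff_mul_le hM).mp hτdiv'
      rw [drop_elem_of_run d p (score.count v) v _ hdrop (τ * M - 1) (by omega) (by omega)]
      rfl
    have hsplit : ∑ τ ∈ Finset.Ico X (full + 1), (d[τ * M - 1]?.getD 0 : Int)
        = (∑ τ ∈ Finset.Ico X X', (d[τ * M - 1]?.getD 0 : Int))
          + ∑ τ ∈ Finset.Ico X' (full + 1), (d[τ * M - 1]?.getD 0 : Int) :=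
      (Finset.sum_Ico_consecutive _ hmono (by omega)).symm
    have hconst : ∑ τ ∈ Finset.Ico X X', (d[τ * M - 1]?.getD 0 : Int)
        = ((X' - X : ℕ) : Int) * v := by
      rw [Finset.sum_congr rfl hval, Finset.sum_const, Nat.card_Ico]
      simp [mul_comm]
    rw [hsplit, hconst]
    ring

-- counting in the run concatenation of a nodup key list
lemma count_flatMap_runs (score : List Int) :
    ∀ (ks : List Int), ks.Nodup → ∀ w : Int,
    (ks.flatMap (fun v => List.replicate (score.count v) v)).count w
      = if w ∈ ks then score.count w else 0 := by
  intro ks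
  induction ks with
  | nil => intro _ w; simp
  | cons a rest ih =>
    intro hnd w
    have hnd' := List.nodup_cons.mp hnd
    simp only [List.flatMap_cons, List.count_append, List.count_replicate, ih hnd'.2 w,
      List.mem_cons]
    by_cases hw : w = a
    · subst hw
      simp [hnd'.1]
    · by_cases hwr : w ∈ rest
      · simp [hw, hwr, Ne.symm hw]
      · simp [hw, hwr, Ne.symm hw]

-- runs of a pairwise-descending key list concatenate to a pairwise-descending list
lemma flatMap_runs_pairwise (score : List Int) :
    ∀ (ks : List Int), ks.Pairwise (fun a b : Int => b ≤ a) →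
    (ks.flatMap (fun v => List.replicate (score.count v) v)).Pairwise (fun a b : Int => b ≤ a) := by
  intro ks
  induction ks with
  | nil => intro _; simp
  | cons a rest ih =>
    intro hp
    have hp' := List.pairwise_cons.mp hp
    simp only [List.flatMap_cons]
    rw [List.pairwise_append]
    refine ⟨List.pairwise_replicate.mpr (Or.inr (le_refl a)), ih hp'.2, ?_⟩
    intro x hx y hy
    have hxa : x = a := List.eq_of_mem_replicate hx
    obtain ⟨ub, hub, hyu⟩ := List.mem_flatMap.mp hy
    have hyb : y = ub := List.eq_of_mem_replicate hyu
    subst hxa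
    subst hyb
    exact hp'.1 _ hub

-- the descending sort is the concatenation of its runs, one per distinct value in descending order
lemma runs_decomposition (score : List Int) :
    (PySem.List.sorted score (fun x => x)).reverse
      = (PySem.List.sorted (PySem.Set.ofList score) (fun x => x) true).flatMap
          (fun v => List.replicate (score.count v) v) := by
  set ks := PySem.List.sorted (PySem.Set.ofList score) (fun x => x) true with hks
  set R := ks.flatMap (fun v => List.replicate (score.count v) v) with hR
  have hknd : ks.Nodup := ((PySem.List.sorted_perm _ _ _).nodup_iff).mpr (PySem.Set.nodup_ofList score)
  have hkmem : ∀ w : Int, w ∈ ks ↔ w ∈ score := by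
    intro w
    rw [hks, PySem.List.mem_sorted, PySem.Set.mem_ofList]
  have hperm : R.Perm score := by
    rw [List.perm_iff_count]
    intro w
    rw [hR, count_flatMap_runs score ks hknd w]
    by_cases hw : w ∈ ks
    · rw [if_pos hw]
    · rw [if_neg hw]
      have : w ∉ score := fun h => hw ((hkmem w).mpr h)
      exact (List.count_eq_zero.mpr this).symm
  have hpair : R.Pairwise (fun a b : Int => b ≤ a) :=
    flatMap_runs_pairwise score ks (PySem.List.sorted_pairwise_rev _ _)
  have hmain : PySem.List.sorted score (fun x => x) = R.reverse := by
    apply PySem.List.sorted_id_eq_of_perm_of_pairwise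
    · exact (List.reverse_perm R).trans hperm
    · rw [List.pairwise_reverse]
      exact hpair
  rw [hmain, List.reverse_reverse]

-- B = bRef for positive m
lemma alt_case_pos (k m : Int) (score : List Int) (hm : 0 < m) :
    solution_alt k m score = bRef m score := by
  obtain ⟨M, rfl⟩ : ∃ M : ℕ, m = (M : Int) := ⟨m.toNat, (Int.toNat_of_nonneg hm.le).symm⟩
  have hM : 0 < M := by exact_mod_cast hm
  unfold solution_alt
  rw [PySem.Dict.foldl_insert_getD_add_one_eq_counter]
  simp only [PySem.Dict.keys_counter, PySem.Int.floordiv_natCast]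
  set s := PySem.List.sorted score (fun x => x) with hs
  set d := s.reverse with hd
  have hnd : d.length = score.length := by
    rw [hd, List.length_reverse, hs, PySem.List.length_sorted]
  have hdecomp : d = (PySem.List.sorted (PySem.Set.ofList score) (fun x => x) true).flatMap
      (fun v => List.replicate (score.count v) v) := by
    rw [hd, hs]; exact runs_decomposition score
  have hwalk := walk score M hM d
    (PySem.List.sorted (PySem.Set.ofList score) (fun x => x) true) 0 0
    (by rw [List.drop_zero]; exact hdecomp)
    (by rw [Nat.zero_add, ← hdecomp])
  rw [hnd] at hwalk
  have h0 : min (score.length / M) (0 / M) + 1 = 1 := by simp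
  rw [h0] at hwalk
  have hstart : ((0 : Int), (0 : Int), (1 : Int))
      = ((0 : Int), ((0 : ℕ) : Int), ((1 : ℕ) : Int)) := by norm_num
  rw [hstart, hwalk, zero_add]
  -- reduce bRef to the same Finset sum
  unfold bRef
  rw [← hs, PySem.List.length_sorted, PySem.Int.floordiv_natCast]
  rw [PySem.List.pyRange_one, PySem.List.foldl_add, zero_add, List.map_map]
  have hq0 : ((((score.length / M : ℕ) : Int)) - 0).toNat = score.length / M := by
    rw [Int.sub_zero, Int.toNat_natCast]
  rw [hq0, list_range_sum]
  rw [Finset.sum_Ico_eq_sum_range]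
  have hcard : score.length / M + 1 - 1 = score.length / M := by omega
  rw [hcard]
  congr 1
  apply Finset.sum_congr rfl
  intro i hi
  have hiq : i < score.length / M := Finset.mem_range.mp hi
  have hle : (i + 1) * M ≤ score.length := (Nat.le_div_iff_mul_le hM).mp (by omega)
  have hslen : s.length = score.length := by rw [hs, PySem.List.length_sorted]
  simp only [Function.comp_apply]
  have hidx : ((score.length : ℕ) : Int) - (((0 : Int) + (i : Int)) + 1) * (M : Int)
      = ((score.length - (i + 1) * M : ℕ) : Int) := by
    rw [Nat.cast_sub hle]; push_cast; ring
  rw [hidx, PySem.List.pyGet?_natCast]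
  have hpos1 : 0 < (i + 1) * M := Nat.mul_pos (by omega) hM
  have hlt : score.length - (i + 1) * M < s.length := by
    rw [hslen]; omega
  rw [List.getElem?_eq_getElem hlt]
  have hdlt : (1 + i) * M - 1 < d.length := by
    rw [hnd]
    have h1 : 0 < (1 + i) * M := Nat.mul_pos (by omega) hM
    calc (1 + i) * M - 1 < (1 + i) * M := by omega
    _ = (i + 1) * M := by ring
    _ ≤ score.length := hle
  rw [hd, List.getElem?_reverse (by rw [List.length_reverse] at hdlt; exact hdlt)]
  rw [List.getElem?_eq_getElem (by rw [hslen]; omega)]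
  simp only [Option.getD_some]
  congr 1
  rw [hslen]
  have hM1 : 1 ≤ M := hM
  have : (1 + i) * M = (i + 1) * M := by ring
  omega

-- B = bRef = 0 for negative m
lemma alt_case_neg (k m : Int) (score : List Int) (hm : m < 0) :
    solution_alt k m score = bRef m score := by
  have hfullneg : PySem.Int.floordiv ((PySem.List.sorted score (fun x => x)).length : Int) m ≤ 0 := by
    have h1 := PySem.Int.floordiv_mul_add_mod ((PySem.List.sorted score (fun x => x)).length : Int) m
    have h2 := PySem.Int.mod_neg_bounds (a := ((PySem.List.sorted score (fun x => x)).length : Int)) hm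
    have h3 : (0:Int) ≤ ((PySem.List.sorted score (fun x => x)).length : Int) := Int.natCast_nonneg _
    nlinarith [h1, h2.1, h2.2, h3]
  have hfullneg' : PySem.Int.floordiv (score.length : Int) m ≤ 0 := by
    rw [show ((score.length : ℕ) : Int)
        = (((PySem.List.sorted score (fun x => x)).length : ℕ) : Int) by
      rw [PySem.List.length_sorted]]
    exact hfullneg
  have hzero : ∀ (r : List Int) (pos total : Int),
      (r.foldl (fun st v =>
        let pos := st.2.1 + (score.foldl (fun d x => d.insert x (d.getD x 0 + 1)) PySem.Dict.empty).getD v 0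
        let tt := bWhile v m (PySem.Int.floordiv (score.length : Int) m) pos st.1 st.2.2
        (tt.1, pos, tt.2)) (total, pos, (1 : Int))).1 = total := by
    intro r
    induction r with
    | nil => intro pos total; rfl
    | cons v rest ih =>
      intro pos total
      simp only [List.foldl_cons]
      rw [show bWhile v m (PySem.Int.floordiv (score.length : Int) m)
          (pos + (score.foldl (fun d x => d.insert x (d.getD x 0 + 1)) PySem.Dict.empty).getD v 0)
          total 1 = (total, 1) by rw [bWhile]; rw [dif_neg (by omega)]]
      exact ih _ total
  unfold solution_alt
  rw [hzero]
  unfold bRef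
  rw [PySem.List.pyRange_one_eq_nil hfullneg]
  simp

lemma alt_eq_bRef (k m : Int) (score : List Int) (hm : m ≠ 0) :
    solution_alt k m score = bRef m score := by
  rcases lt_or_gt_of_ne hm with hneg | hpos
  · exact alt_case_neg k m score hneg
  · exact alt_case_pos k m score hpos

-- ===== VERDICT (by name: the statement is the Claim_ definition above) =====
theorem solution_spec : Claim_equal_solution := by
  intro k m score _ hpre
  unfold Spec_solution
  rw [A_eq_bRef k m score hpre, alt_eq_bRef k m score hpre]
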